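-- pv_equiv track=rewrite | github.com/iteraai/plan_execution | plan_execution/tasks.py | _has_ui_text_signal
-- ===== SOURCE A (Python) =====
-- from typing import Any
--
-- UI_TEXT_SIGNAL_KEYWORDS = (
--     "ui",
--     "user ui",
--     "user interface",
--     "ux",
--     "user experience",
--     "frontend",
--     "front end",
--     "pixel perfect",
--     "visual",
--     "layout",
--     "spacing",
--     "typography",
--     "responsive",
--     "interaction",
-- )
--
-- def _normalize_signal_text(value: Any) -> str:
--     if not isinstance(value, str):
--         return ""
--     normalized = value.lower().replace("_", " ").replace("-", " ")
--     return " ".join(normalized.split())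
--
-- def _has_ui_text_signal(values: list[Any]) -> bool:
--     for value in values:
--         normalized = _normalize_signal_text(value)
--         if not normalized:
--             continue
--         padded = f" {normalized} "
--         for keyword in UI_TEXT_SIGNAL_KEYWORDS:
--             if f" {keyword} " in padded:
--                 return True
--     return False
-- ===== SOURCE B (Python) =====
-- from typing import Any
--
-- UI_TEXT_SIGNAL_KEYWORDS = (
--     "ui",
--     "user ui",
--     "user interface",
--     "ux",
--     "user experience",
--     "frontend",
--     "front end",
--     "pixel perfect",
--     "visual",
--     "layout",
--     "spacing",
--     "typography",
--     "responsive",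
--     "interaction",
-- )
--
-- # Each keyword pre-split into its whitespace-separated tokens.
-- _KW_TOKENS = tuple(tuple(kw.split()) for kw in UI_TEXT_SIGNAL_KEYWORDS)
--
--
-- def _has_ui_text_signal(values: list[Any]) -> bool:
--     for value in values:
--         if not isinstance(value, str):
--             continue
--         # Tokenize directly: no join/re-split, no padding, no substring search.
--         tokens = value.lower().replace("_", " ").replace("-", " ").split()
--         n = len(tokens)
--         for kt in _KW_TOKENS:
--             k = len(kt)
--             if any(tuple(tokens[i:i + k]) == kt for i in range(n - k + 1)):
--                 return True
--     return False
-- ===== Notes on version B (the rewrite author's own statement) =====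
-- stated objective: alternative
-- what changed: B tokenizes each normalized value once (lower/replace/split, no join or padding) and checks each pre-split keyword as a consecutive run in the token list, instead of rebuilding a padded string and doing a substring search per keyword.
import Mathlib
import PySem

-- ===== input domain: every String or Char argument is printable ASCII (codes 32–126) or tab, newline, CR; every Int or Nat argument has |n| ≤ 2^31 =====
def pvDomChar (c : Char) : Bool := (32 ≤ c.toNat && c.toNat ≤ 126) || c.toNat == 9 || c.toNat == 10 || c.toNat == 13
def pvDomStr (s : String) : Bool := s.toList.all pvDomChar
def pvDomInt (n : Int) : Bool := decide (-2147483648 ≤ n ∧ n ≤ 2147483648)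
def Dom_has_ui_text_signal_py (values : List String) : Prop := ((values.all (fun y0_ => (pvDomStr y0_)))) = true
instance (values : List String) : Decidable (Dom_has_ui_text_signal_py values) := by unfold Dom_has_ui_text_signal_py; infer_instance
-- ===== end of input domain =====

-- B replaces A's padded-string substring search by whole-token run matching over the token
-- list (keywords pre-split into tokens); same return value, no speed claim (objective: alternative).

-- ===== PORT A =====
-- the keyword tuple UI_TEXT_SIGNAL_KEYWORDS, as char lists (ports work on List Char throughout)
def pvKeywords : List (List Char) :=
  [['u', 'i'],
   ['u', 's', 'e', 'r', ' ', 'u', 'i'],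
   ['u', 's', 'e', 'r', ' ', 'i', 'n', 't', 'e', 'r', 'f', 'a', 'c', 'e'],
   ['u', 'x'],
   ['u', 's', 'e', 'r', ' ', 'e', 'x', 'p', 'e', 'r', 'i', 'e', 'n', 'c', 'e'],
   ['f', 'r', 'o', 'n', 't', 'e', 'n', 'd'],
   ['f', 'r', 'o', 'n', 't', ' ', 'e', 'n', 'd'],
   ['p', 'i', 'x', 'e', 'l', ' ', 'p', 'e', 'r', 'f', 'e', 'c', 't'],
   ['v', 'i', 's', 'u', 'a', 'l'],
   ['l', 'a', 'y', 'o', 'u', 't'],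
   ['s', 'p', 'a', 'c', 'i', 'n', 'g'],
   ['t', 'y', 'p', 'o', 'g', 'r', 'a', 'p', 'h', 'y'],
   ['r', 'e', 's', 'p', 'o', 'n', 's', 'i', 'v', 'e'],
   ['i', 'n', 't', 'e', 'r', 'a', 'c', 't', 'i', 'o', 'n']]

-- _normalize_signal_text: the isinstance branch is vacuous here (inputs are List String);
-- value.lower().replace("_"," ").replace("-"," ") then " ".join(normalized.split())
def pvNormalize (value : String) : List Char :=
  PySem.Chars.join [' ']
    (PySem.Chars.split₀
      (PySem.Chars.replace (PySem.Chars.replace (PySem.Chars.lower value.toList) ['_'] [' ']) ['-'] [' ']))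

def has_ui_text_signal_py : List String → Bool
  | [] => false
  | value :: rest =>
    let normalized := pvNormalize value
    if normalized = [] then has_ui_text_signal_py rest
    else
      let padded := ' ' :: normalized ++ [' ']
      if pvKeywords.any (fun kw => PySem.Chars.isIn (' ' :: kw ++ [' ']) padded) then true
      else has_ui_text_signal_py rest

-- ===== PORT B =====
-- _KW_TOKENS: each keyword pre-split into its whitespace tokens (a module-level constant in Source B)
def pvKwTokens : List (List (List Char)) :=
  [[['u', 'i']],
   [['u', 's', 'e', 'r'], ['u', 'i']],
   [['u', 's', 'e', 'r'], ['i', 'n', 't', 'e', 'r', 'f', 'a', 'c', 'e']],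
   [['u', 'x']],
   [['u', 's', 'e', 'r'], ['e', 'x', 'p', 'e', 'r', 'i', 'e', 'n', 'c', 'e']],
   [['f', 'r', 'o', 'n', 't', 'e', 'n', 'd']],
   [['f', 'r', 'o', 'n', 't'], ['e', 'n', 'd']],
   [['p', 'i', 'x', 'e', 'l'], ['p', 'e', 'r', 'f', 'e', 'c', 't']],
   [['v', 'i', 's', 'u', 'a', 'l']],
   [['l', 'a', 'y', 'o', 'u', 't']],
   [['s', 'p', 'a', 'c', 'i', 'n', 'g']],
   [['t', 'y', 'p', 'o', 'g', 'r', 'a', 'p', 'h', 'y']],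
   [['r', 'e', 's', 'p', 'o', 'n', 's', 'i', 'v', 'e']],
   [['i', 'n', 't', 'e', 'r', 'a', 'c', 't', 'i', 'o', 'n']]]

-- value.lower().replace("_"," ").replace("-"," ").split()
def pvTokens (value : String) : List (List Char) :=
  PySem.Chars.split₀
    (PySem.Chars.replace (PySem.Chars.replace (PySem.Chars.lower value.toList) ['_'] [' ']) ['-'] [' '])

-- any(tuple(tokens[i:i+k]) == kt for i in range(n - k + 1))
def pvMatchRun (tokens : List (List Char)) (kt : List (List Char)) : Bool :=
  (PySem.List.pyRange 0 ((tokens.length : Int) - (kt.length : Int) + 1) 1).any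
    (fun i => PySem.List.slice tokens (some i) (some (i + (kt.length : Int))) == kt)

def has_ui_text_signal_py_alt : List String → Bool
  | [] => false
  | value :: rest =>
    let tokens := pvTokens value
    if pvKwTokens.any (fun kt => pvMatchRun tokens kt) then true
    else has_ui_text_signal_py_alt rest

-- ===== PRECONDITION & SPEC =====
def Spec_has_ui_text_signal_py (values : List String) (out : Bool) : Prop := out = has_ui_text_signal_py_alt values
instance (values : List String) (out : Bool) : Decidable (Spec_has_ui_text_signal_py values out) := by unfold Spec_has_ui_text_signal_py; infer_instance

-- ===== CLAIM (what is proved, stated in full; the proofs are below) =====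
def Claim_equal_has_ui_text_signal_py : Prop := ∀ (values : List String), Dom_has_ui_text_signal_py values → Spec_has_ui_text_signal_py values (has_ui_text_signal_py values)

-- ===== LEMMAS AND PROOFS =====

-- a good token list: every token nonempty and free of the space character
def pvGood (ts : List (List Char)) : Prop := ∀ t ∈ ts, t ≠ [] ∧ ' ' ∉ t

-- proof-side abbreviation for " ".join
def pvJ (ts : List (List Char)) : List Char := PySem.Chars.join [' '] ts

-- split₀.go goodness
lemma pv_split_go_good : ∀ (s cur : List Char) (acc : List (List Char)),
    (∀ c ∈ cur, PySem.Chars.isspace c = false) →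
    (∀ t ∈ acc, t ≠ [] ∧ ∀ c ∈ t, PySem.Chars.isspace c = false) →
    ∀ t ∈ PySem.Chars.split₀.go s cur acc, t ≠ [] ∧ ∀ c ∈ t, PySem.Chars.isspace c = false := by
  intro s
  induction s with
  | nil =>
    intro cur acc hcur hacc t ht
    simp only [PySem.Chars.split₀.go] at ht
    by_cases h : cur.isEmpty
    · simp [h] at ht; exact hacc t (by simpa using ht)
    · simp [h, List.mem_reverse] at ht
      rcases ht with h1 | h2
      · exact hacc t h1
      · subst h2
        refine ⟨?_, fun d hd => hcur d (List.mem_reverse.mp hd)⟩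
        simpa [List.isEmpty_iff, List.reverse_eq_nil_iff] using h
  | cons c rest ih =>
    intro cur acc hcur hacc t ht
    simp only [PySem.Chars.split₀.go] at ht
    by_cases hsp : PySem.Chars.isspace c
    · by_cases hce : cur.isEmpty
      · simp [hsp, hce] at ht
        exact ih [] acc (by simp) hacc t ht
      · simp [hsp, hce] at ht
        refine ih [] (cur.reverse :: acc) (by simp) ?_ t ht
        intro u hu
        rcases List.mem_cons.mp hu with h1 | h2
        · subst h1
          exact ⟨by simpa [List.isEmpty_iff, List.reverse_eq_nil_iff] using hce,
                 fun d hd => hcur d (List.mem_reverse.mp hd)⟩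
        · exact hacc u h2
    · simp [hsp] at ht
      refine ih (c :: cur) acc ?_ hacc t ht
      intro d hd
      rcases List.mem_cons.mp hd with h1 | h2
      · subst h1; simpa using hsp
      · exact hcur d h2
lemma pvJ_ne_nil {ts : List (List Char)} (h : pvGood ts) (h0 : ts ≠ []) : pvJ ts ≠ [] := by
  match ts, h0 with
  | t :: ts', _ =>
    have ht := (h t (by simp)).1
    cases ts' with
    | nil => simpa [pvJ, PySem.Chars.join_singleton] using ht
    | cons q rest =>
      rw [pvJ, PySem.Chars.join_cons_cons]
      simp [List.append_eq_nil_iff]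

-- SP: prefix alignment at the first space
lemma pv_sp : ∀ (a b x y : List Char), ' ' ∉ a → ' ' ∉ b →
    ((a ++ ' ' :: x <+: b ++ ' ' :: y) ↔ (a = b ∧ x <+: y)) := by
  intro a
  induction a with
  | nil =>
    intro b x y _ hb
    cases b with
    | nil => simp [List.cons_prefix_cons]
    | cons c b' =>
      simp only [List.nil_append, List.cons_append, List.cons_prefix_cons]
      constructor
      · rintro ⟨rfl, -⟩; exact absurd (by simp) hb
      · rintro ⟨h, -⟩; exact absurd h (by simp)
  | cons c a' ih =>
    intro b x y ha hb
    cases b with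
    | nil =>
      simp only [List.cons_append, List.nil_append, List.cons_prefix_cons]
      constructor
      · rintro ⟨rfl, -⟩; exact absurd (by simp) ha
      · rintro ⟨h, -⟩; exact absurd h (by simp)
    | cons d b' =>
      simp only [List.cons_append, List.cons_prefix_cons]
      rw [ih b' x y (fun h => ha (by simp [h])) (fun h => hb (by simp [h]))]
      constructor
      · rintro ⟨rfl, rfl, h⟩; exact ⟨rfl, h⟩
      · rintro ⟨h, hx⟩
        injection h with h1 h2
        exact ⟨h1, h2, hx⟩

-- OCC: an occurrence of a space inside t ++ ' ' :: r, with t space-free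
lemma pv_occ : ∀ (u t m r : List Char), ' ' ∉ t → u ++ ' ' :: m = t ++ ' ' :: r →
    (u = t ∧ m = r) ∨ ∃ w, u = t ++ ' ' :: w ∧ w ++ ' ' :: m = r := by
  intro u
  induction u with
  | nil =>
    intro t m r ht h
    cases t with
    | nil => left; simpa using h
    | cons d t' =>
      injection h with h1 h2
      exact absurd (h1 ▸ List.mem_cons_self) ht
  | cons c u' ih =>
    intro t m r ht h
    cases t with
    | nil =>
      simp only [List.nil_append] at h
      injection h with h1 h2
      right; exact ⟨u', by simp [h1], h2⟩
    | cons d t' =>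
      injection h with h1 h2
      subst h1
      rcases ih t' m r (fun hh => ht (by simp [hh])) h2 with ⟨rfl, rfl⟩ | ⟨w, hw1, hw2⟩
      · left; exact ⟨rfl, rfl⟩
      · right; exact ⟨w, by simp [hw1], hw2⟩

-- PRE: padded-prefix ↔ token-prefix
lemma pv_pre : ∀ (kts ts : List (List Char)), pvGood kts → pvGood ts → kts ≠ [] → ts ≠ [] →
    ((pvJ kts ++ [' '] <+: pvJ ts ++ [' ']) ↔ kts <+: ts) := by
  intro kts
  induction kts with
  | nil => intro ts _ _ h; exact absurd rfl h
  | cons k kts' ih =>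
    intro ts hk ht _ ht0
    match ts, ht0 with
    | t :: ts', _ =>
      have hkf : ' ' ∉ k := (hk k (by simp)).2
      have htf : ' ' ∉ t := (ht t (by simp)).2
      cases kts' with
      | nil =>
        cases ts' with
        | nil =>
          rw [show pvJ [k] ++ [' '] = k ++ ' ' :: [] by simp [pvJ, PySem.Chars.join_singleton],
              show pvJ [t] ++ [' '] = t ++ ' ' :: [] by simp [pvJ, PySem.Chars.join_singleton],
              pv_sp k t [] [] hkf htf]
          simp [List.cons_prefix_cons]
        | cons q rest =>
          rw [show pvJ [k] ++ [' '] = k ++ ' ' :: [] by simp [pvJ, PySem.Chars.join_singleton],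
              show pvJ (t :: q :: rest) ++ [' '] = t ++ ' ' :: (pvJ (q :: rest) ++ [' ']) by
                simp [pvJ, PySem.Chars.join_cons_cons],
              pv_sp k t [] _ hkf htf]
          simp [List.cons_prefix_cons]
      | cons k2 krest =>
        have hkne : pvJ (k2 :: krest) ++ [' '] ≠ [] := by simp
        cases ts' with
        | nil =>
          rw [show pvJ (k :: k2 :: krest) ++ [' '] = k ++ ' ' :: (pvJ (k2 :: krest) ++ [' ']) by
                simp [pvJ, PySem.Chars.join_cons_cons],
              show pvJ [t] ++ [' '] = t ++ ' ' :: [] by simp [pvJ, PySem.Chars.join_singleton],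
              pv_sp k t _ [] hkf htf]
          simp [List.cons_prefix_cons, List.prefix_nil]
        | cons q rest =>
          rw [show pvJ (k :: k2 :: krest) ++ [' '] = k ++ ' ' :: (pvJ (k2 :: krest) ++ [' ']) by
                simp [pvJ, PySem.Chars.join_cons_cons],
              show pvJ (t :: q :: rest) ++ [' '] = t ++ ' ' :: (pvJ (q :: rest) ++ [' ']) by
                simp [pvJ, PySem.Chars.join_cons_cons],
              pv_sp k t _ _ hkf htf,
              ih (q :: rest) (fun u hu => hk u (List.mem_cons_of_mem _ hu)) (fun u hu => ht u (List.mem_cons_of_mem _ hu)) (by simp) (by simp)]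
          simp [List.cons_prefix_cons]

-- MAIN: padded-infix ↔ token-infix
lemma pv_main : ∀ (ts kts : List (List Char)), pvGood kts → pvGood ts → kts ≠ [] →
    ((' ' :: (pvJ kts ++ [' '])) <:+: (' ' :: (pvJ ts ++ [' '])) ↔ kts <:+: ts) := by
  intro ts
  induction ts with
  | nil =>
    intro kts hk _ hk0
    constructor
    · intro h
      have h1 := List.IsInfix.length_le h
      have h2 : pvJ kts ≠ [] := pvJ_ne_nil hk hk0
      have h3 : 1 ≤ (pvJ kts).length := by
        cases hpj : pvJ kts with
        | nil => exact absurd hpj h2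
        | cons a l => simp
      rw [show pvJ ([] : List (List Char)) = [] by simp [pvJ, PySem.Chars.join_nil]] at h1
      simp only [List.nil_append, List.length_cons, List.length_append, List.length_nil] at h1
      omega
    · intro h
      exact absurd (List.infix_nil.mp h) hk0
  | cons t ts' ih =>
    intro kts hk ht hk0
    have htf : ' ' ∉ t := (ht t (by simp)).2
    have ht' : pvGood ts' := fun u hu => ht u (List.mem_cons_of_mem _ hu)
    constructor
    · rintro ⟨u, v, huv⟩
      cases u with
      | nil =>
        -- prefix occurrence
        have hpre : (' ' :: (pvJ kts ++ [' '])) <+: (' ' :: (pvJ (t :: ts') ++ [' '])) := ⟨v, by simpa using huv⟩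
        rw [List.cons_prefix_cons] at hpre
        exact (List.IsPrefix.isInfix ((pv_pre kts (t :: ts') hk ht hk0 (by simp)).mp hpre.2))
      | cons c u' =>
        rw [List.cons_append, List.cons_append] at huv
        have hc : c = ' ' := by injection huv
        have htail : u' ++ ' ' :: ((pvJ kts ++ [' ']) ++ v) = pvJ (t :: ts') ++ [' '] := by
          injection huv with _ h2
          simpa using h2
        cases hts' : ts' with
        | nil =>
          -- tail = t ++ ' ' :: []
          rw [hts'] at htail
          have htl : u' ++ ' ' :: ((pvJ kts ++ [' ']) ++ v) = t ++ ' ' :: [] := by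
            simpa [pvJ, PySem.Chars.join_singleton] using htail
          rcases pv_occ _ _ _ _ htf htl with ⟨-, h2⟩ | ⟨w, -, h2⟩
          · exact absurd h2 (by simp)
          · exact absurd h2 (by simp)
        | cons q rest =>
          rw [hts'] at htail
          have htl : u' ++ ' ' :: ((pvJ kts ++ [' ']) ++ v) = t ++ ' ' :: (pvJ (q :: rest) ++ [' ']) := by
            simpa [pvJ, PySem.Chars.join_cons_cons] using htail
          have hgq : pvGood (q :: rest) := fun u hu => ht u (by rw [hts']; exact List.mem_cons_of_mem _ hu)
          rcases pv_occ _ _ _ _ htf htl with ⟨-, h2⟩ | ⟨w, -, h2⟩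
          · -- needle is a prefix of ' ' :: (pvJ (q::rest) ++ [' '])
            have hpre : pvJ kts ++ [' '] <+: pvJ (q :: rest) ++ [' '] := ⟨v, by simpa using h2⟩
            have := (pv_pre kts (q :: rest) hk hgq hk0 (by simp)).mp hpre
            exact List.infix_cons this.isInfix
          · -- needle occurs inside pvJ (q::rest) ++ [' ']
            have hinf2 : (' ' :: (pvJ kts ++ [' '])) <:+: (' ' :: (pvJ (q :: rest) ++ [' '])) := by
              refine List.infix_cons ⟨w, v, ?_⟩
              simpa using h2
            rw [hts'] at ih
            exact List.infix_cons ((ih kts hk hgq hk0).mp hinf2)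
    · rintro ⟨a, b, hab⟩
      cases a with
      | nil =>
        have : kts <+: t :: ts' := ⟨b, by simpa using hab⟩
        have := (pv_pre kts (t :: ts') hk ht hk0 (by simp)).mpr this
        exact (List.cons_prefix_cons.mpr ⟨rfl, this⟩).isInfix
      | cons t0 a' =>
        have ht0 : t0 = t := by injection hab
        have hts' : ts' = a' ++ kts ++ b := by injection hab; simp_all
        have hne : ts' ≠ [] := by
          intro h; rw [h] at hts'
          rcases List.append_eq_nil_iff.mp hts'.symm with ⟨h1, -⟩
          exact hk0 (List.append_eq_nil_iff.mp h1).2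
        have hinf : kts <:+: ts' := ⟨a', b, hts'.symm⟩
        have hmain := (ih kts hk ht' hk0).mpr hinf
        -- hay = (' ' :: t) ++ (' ' :: (pvJ ts' ++ [' ']))
        have hhay : ' ' :: (pvJ (t :: ts') ++ [' ']) = (' ' :: t) ++ (' ' :: (pvJ ts' ++ [' '])) := by
          match ts', hne with
          | q :: rest, _ => simp [pvJ, PySem.Chars.join_cons_cons]
        rw [hhay]
        exact hmain.trans ((List.suffix_append _ _).isInfix)


lemma pv_run (ts kts : List (List Char)) : pvMatchRun ts kts = true ↔ kts <:+: ts := by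
  rw [pvMatchRun, List.any_eq_true]
  constructor
  · rintro ⟨i, hi, hslice⟩
    rw [PySem.List.mem_pyRange_one] at hi
    obtain ⟨j, rfl⟩ : ∃ j : Nat, i = (j : Int) := ⟨i.toNat, (Int.toNat_of_nonneg hi.1).symm⟩
    rw [PySem.List.slice_natCast_add, beq_iff_eq] at hslice
    rw [← hslice]
    exact ((List.take_prefix _ _).isInfix).trans (List.drop_suffix _ _).isInfix
  · rintro ⟨u, v, huv⟩
    refine ⟨(u.length : Int), ?_, ?_⟩
    · rw [PySem.List.mem_pyRange_one]
      have : ts.length = u.length + kts.length + v.length := by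
        rw [← huv]; simp; omega
      omega
    · rw [PySem.List.slice_natCast_add, beq_iff_eq, ← huv]
      rw [List.append_assoc, List.drop_left, List.take_left]

-- goodness of the tokens produced by split₀
lemma pv_tokens_good (v : String) : pvGood (pvTokens v) := by
  intro t ht
  have := pv_split_go_good _ [] [] (by simp) (by simp) t (by simpa [pvTokens, PySem.Chars.split₀] using ht)
  refine ⟨this.1, fun hsp => ?_⟩
  have := this.2 ' ' hsp
  simp [PySem.Chars.isspace] at this

-- per-keyword equivalence: padded substring test = token-run test
lemma pv_kweq (kw : List Char) (kt ts : List (List Char)) (h1 : kw = pvJ kt)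
    (h2 : pvGood kt) (h3 : kt ≠ []) (ht : pvGood ts) :
    PySem.Chars.isIn (' ' :: kw ++ [' ']) (' ' :: pvJ ts ++ [' ']) = pvMatchRun ts kt := by
  rw [Bool.eq_iff_iff, PySem.Chars.isIn_iff_infix, pv_run, h1]
  exact pv_main ts kt h2 ht h3

-- pairing the keyword list with the pre-split token lists
lemma pv_pair : ∀ (kws : List (List Char)) (ktss : List (List (List Char))),
    List.Forall₂ (fun kw kt => kw = pvJ kt ∧ pvGood kt ∧ kt ≠ []) kws ktss →
    ∀ ts, pvGood ts →
    kws.any (fun kw => PySem.Chars.isIn (' ' :: kw ++ [' ']) (' ' :: pvJ ts ++ [' '])) =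
      ktss.any (fun kt => pvMatchRun ts kt) := by
  intro kws ktss h
  induction h with
  | nil => intro ts _; rfl
  | cons hhd _ ih =>
    intro ts ht
    simp only [List.any_cons, ih ts ht, pv_kweq _ _ ts hhd.1 hhd.2.1 hhd.2.2 ht]

lemma pv_hpair : List.Forall₂ (fun kw kt => kw = pvJ kt ∧ pvGood kt ∧ kt ≠ []) pvKeywords pvKwTokens := by
  simp only [pvKeywords, pvKwTokens, List.forall₂_cons, List.forall₂_nil_right_iff]
  refine ⟨?_, ?_, ?_, ?_, ?_, ?_, ?_, ?_, ?_, ?_, ?_, ?_, ?_, ?_, trivial⟩ <;>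
    exact ⟨by decide, by intro t ht; revert t; decide, by decide⟩

-- the two programs agree on every input
lemma pv_all : ∀ values, has_ui_text_signal_py values = has_ui_text_signal_py_alt values := by
  intro values
  induction values with
  | nil => rfl
  | cons v rest ih =>
    have hg : pvGood (pvTokens v) := pv_tokens_good v
    have hnorm : pvNormalize v = pvJ (pvTokens v) := rfl
    simp only [has_ui_text_signal_py, has_ui_text_signal_py_alt]
    by_cases h : pvNormalize v = []
    · have hts : pvTokens v = [] := by
        by_contra hne
        exact pvJ_ne_nil hg hne (hnorm ▸ h)
      rw [if_pos h, hts, show pvKwTokens.any (fun kt => pvMatchRun [] kt) = false by decide]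
      simpa using ih
    · rw [if_neg h, hnorm, pv_pair pvKeywords pvKwTokens pv_hpair (pvTokens v) hg, ih]

-- ===== VERDICT (by name: the statement is the Claim_ definition above) =====
theorem has_ui_text_signal_py_spec : Claim_equal_has_ui_text_signal_py := by
  intro values _
  unfold Spec_has_ui_text_signal_py
  exact pv_all values
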